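-- pv_equiv track=rewrite | github.com/kubajal/cpp-benchmarks | nested_maps/preprocess.py | nested_map_declaration
-- ===== SOURCE A (Python) =====
-- def nested_map_declaration(map_type, depth):
--     declaration = ""
--     for i in range(0, depth):
--         declaration = f"{declaration}std::{map_type}<int, "
--     declaration = f"{declaration}int"
--     for i in range(0, depth):
--         declaration = f"{declaration}>"
--     declaration = f"{declaration} m;"
--     return declaration
-- ===== SOURCE B (Python) =====
-- def nested_map_declaration(map_type, depth):
--     def build(d):
--         if d <= 0:
--             return "int"
--         return f"std::{map_type}<int, {build(d - 1)}>"
--     return build(depth) + " m;"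
-- ===== Notes on version B (the rewrite author's own statement) =====
-- stated objective: simpler
-- what changed: Replaces A's two separate concatenation loops (one appending prefixes, one appending closing brackets) by a single recursive helper that builds the nested type directly, with d <= 0 as base case matching A's empty-loop behaviour on non-positive depth.
import Mathlib
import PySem

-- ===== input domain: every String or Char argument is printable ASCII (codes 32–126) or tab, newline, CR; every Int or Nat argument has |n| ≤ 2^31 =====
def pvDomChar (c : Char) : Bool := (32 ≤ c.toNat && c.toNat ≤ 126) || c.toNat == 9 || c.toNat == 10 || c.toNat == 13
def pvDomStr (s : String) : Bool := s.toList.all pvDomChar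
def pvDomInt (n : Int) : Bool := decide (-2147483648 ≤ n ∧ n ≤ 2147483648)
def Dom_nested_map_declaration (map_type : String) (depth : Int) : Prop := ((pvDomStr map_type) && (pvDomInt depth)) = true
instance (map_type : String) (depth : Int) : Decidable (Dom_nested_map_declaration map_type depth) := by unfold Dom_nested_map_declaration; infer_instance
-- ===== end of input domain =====

-- B replaces A's two concatenation loops by one recursive helper building the nested type; objective: simpler.

-- ===== PORT A =====
-- Literal port of A: empty string, a loop appending "std::<map_type><int, ", append "int",
-- a loop appending ">", append " m;".
def nested_map_declaration (map_type : String) (depth : Int) : String :=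
  let declaration := ""
  let declaration := (PySem.List.pyRange 0 depth 1).foldl
    (fun d _ => d ++ ("std::" ++ map_type ++ "<int, ")) declaration
  let declaration := declaration ++ "int"
  let declaration := (PySem.List.pyRange 0 depth 1).foldl (fun d _ => d ++ ">") declaration
  declaration ++ " m;"

-- ===== PORT B =====
-- Port of Source B's recursive helper build(d): "int" when d <= 0, else "std::<map_type><int, " ++ build(d-1) ++ ">".
def nmdBuild (map_type : String) (d : Int) : String :=
  if d ≤ 0 then "int"
  else "std::" ++ map_type ++ "<int, " ++ nmdBuild map_type (d - 1) ++ ">"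
termination_by d.toNat
decreasing_by omega

def nested_map_declaration_alt (map_type : String) (depth : Int) : String :=
  nmdBuild map_type depth ++ " m;"

-- ===== PRECONDITION & SPEC =====
def Spec_nested_map_declaration (map_type : String) (depth : Int) (out : String) : Prop := out = nested_map_declaration_alt map_type depth
instance (map_type : String) (depth : Int) (out : String) : Decidable (Spec_nested_map_declaration map_type depth out) := by unfold Spec_nested_map_declaration; infer_instance

-- ===== CLAIM (what is proved, stated in full; the proofs are below) =====
def Claim_equal_nested_map_declaration : Prop := ∀ (map_type : String) (depth : Int), Dom_nested_map_declaration map_type depth → Spec_nested_map_declaration map_type depth (nested_map_declaration map_type depth)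

-- ===== LEMMAS AND PROOFS =====

/-- `s` repeated `n` times (prepend form). -/
def nmdRep (s : String) : Nat → String
  | 0 => ""
  | n + 1 => s ++ nmdRep s n

lemma nmdRep_succ_right (s : String) (n : Nat) : nmdRep s (n + 1) = nmdRep s n ++ s := by
  induction n with
  | zero => simp [nmdRep]
  | succ k ih =>
    calc nmdRep s (k + 2) = s ++ nmdRep s (k + 1) := rfl
      _ = s ++ (nmdRep s k ++ s) := by rw [ih]
      _ = nmdRep s (k + 1) ++ s := by rw [nmdRep, String.append_assoc]

lemma foldl_appendStr (s : String) (l : List Int) (a : String) :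
    l.foldl (fun d _ => d ++ s) a = a ++ nmdRep s l.length := by
  induction l generalizing a with
  | nil => simp [nmdRep]
  | cons x xs ih =>
    rw [List.foldl_cons, ih, List.length_cons, String.append_assoc]
    rfl

lemma nmdBuild_eq_rep (mt : String) (n : Nat) :
    nmdBuild mt (n : Int) =
      (nmdRep ("std::" ++ mt ++ "<int, ") n ++ "int") ++ nmdRep ">" n := by
  induction n with
  | zero => simp [nmdBuild, nmdRep]
  | succ k ih =>
    rw [nmdBuild]
    have h0 : ¬ ((k + 1 : Nat) : Int) ≤ 0 := by push_cast; omega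
    have h1 : ((k + 1 : Nat) : Int) - 1 = (k : Int) := by push_cast; ring
    rw [if_neg h0, h1, ih, nmdRep_succ_right ">" k]
    show "std::" ++ mt ++ "<int, " ++ _ ++ ">" = _
    simp only [nmdRep, String.append_assoc]

-- ===== VERDICT (by name: the statement is the Claim_ definition above) =====
theorem nested_map_declaration_spec : Claim_equal_nested_map_declaration := by
  intro mt depth _
  unfold Spec_nested_map_declaration nested_map_declaration nested_map_declaration_alt
  by_cases h : depth ≤ 0
  · rw [PySem.List.pyRange_one_eq_nil h, nmdBuild, if_pos h]
    simp
  · have hd : ((depth.toNat : Nat) : Int) = depth := Int.toNat_of_nonneg (by omega)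
    have hlen : (PySem.List.pyRange 0 depth 1).length = depth.toNat := by
      rw [PySem.List.length_pyRange_one]; omega
    simp only [foldl_appendStr, hlen]
    rw [← hd, nmdBuild_eq_rep]
    have hmax : max depth 0 = depth := by omega
    simp [String.append_assoc, hmax]
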